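-- pv_equiv track=rewrite | github.com/CallMeOli/GCSE-Computer-Science | PatternFinder.py | func
-- ===== SOURCE A (Python) =====
-- def func(sequence): # Define func
--     sequence = str(sequence) # Convert sequence to string so it can be iterated
--     sequenceLength = len(sequence) # Save the length of string as a variable so len(num) isn't repeated later
--     pattern = 0 # Create variable for sum with a default value of 0
--
--     for num in sequence: # Iterate over each number in the sequence
--         num = int(num) # Convert string to integer for calculation
--         pattern += num - sequenceLength # Add (num - sequenceLength) to pattern
--
--     return pattern # Return so calling the function is equivelant to pattern
-- ===== SOURCE B (Python) =====
-- def func(sequence):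
--     # Arithmetic digit extraction: no string conversion, peel digits with divmod.
--     n = sequence
--     total = 0
--     count = 0
--     while n > 0:
--         n, digit = divmod(n, 10)
--         total += digit
--         count += 1
--     if count == 0:
--         count = 1  # str(0) == "0": zero still has one digit
--     return total - count * count
-- ===== Notes on version B (the rewrite author's own statement) =====
-- stated objective: alternative
-- what changed: B never converts to a string: it peels digits arithmetically with divmod, counting them as it goes, and applies the length correction once as count*count instead of per-digit.
import Mathlib
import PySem

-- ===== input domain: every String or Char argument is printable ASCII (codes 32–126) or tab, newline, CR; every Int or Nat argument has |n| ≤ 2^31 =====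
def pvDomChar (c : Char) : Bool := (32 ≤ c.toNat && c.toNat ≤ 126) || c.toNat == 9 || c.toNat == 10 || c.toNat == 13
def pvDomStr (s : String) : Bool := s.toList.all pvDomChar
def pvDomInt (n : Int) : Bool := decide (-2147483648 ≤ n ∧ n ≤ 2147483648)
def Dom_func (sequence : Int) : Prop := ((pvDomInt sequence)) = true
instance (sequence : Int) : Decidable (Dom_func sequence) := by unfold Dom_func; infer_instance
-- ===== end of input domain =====

-- B replaces A's string iteration by an arithmetic divmod loop (no str() at all); objective: alternative.

-- ===== PORT A =====
-- int(num) on a single char: PySem.Int.ofChars? [c]; under Pre_func (0 ≤ sequence) every char is a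
-- digit so it is always `some`; the `.getD 0` default is unreachable there (Python raises outside Pre_).
def func (sequence : Int) : Int :=
  let s := PySem.Int.toStr sequence
  let sequenceLength := PySem.Str.len s
  s.toList.foldl (fun pattern c => pattern + ((PySem.Int.ofChars? [c]).getD 0 - sequenceLength)) 0

-- ===== PORT B =====
-- the `while n > 0` loop of Source B: state (n, total, count); divmod n 10 = (floordiv, mod)
def funcAltLoop (n total count : Int) : Int × Int :=
  if h : 0 < n then
    funcAltLoop (PySem.Int.floordiv n 10) (total + PySem.Int.mod n 10) (count + 1)
  else (total, count)
termination_by n.toNat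
decreasing_by
  simp only [PySem.Int.floordiv, Int.fdiv_eq_ediv]
  omega

def func_alt (sequence : Int) : Int :=
  let (total, count) := funcAltLoop sequence 0 0
  let count := if count = 0 then 1 else count
  total - count * count

-- ===== PRECONDITION & SPEC =====
-- Pre_ excludes negative inputs: str(sequence) then contains '-', on which A raises ValueError (int('-')).
def Pre_func (sequence : Int) : Prop := 0 ≤ sequence
instance (sequence : Int) : Decidable (Pre_func sequence) := by unfold Pre_func; infer_instance
def pvWitness_func : Int := 123
def Spec_func (sequence : Int) (out : Int) : Prop := out = func_alt sequence
instance (sequence : Int) (out : Int) : Decidable (Spec_func sequence out) := by unfold Spec_func; infer_instance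

-- ===== CLAIM (what is proved, stated in full; the proofs are below) =====
def Claim_equal_func : Prop := ∀ (sequence : Int), Dom_func sequence → Pre_func sequence → Spec_func sequence (func sequence)

-- ===== LEMMAS AND PROOFS =====

-- the per-char value A computes
def digitVal (c : Char) : Int := (PySem.Int.ofChars? [c]).getD 0

lemma digitVal_digitChar (d : ℕ) (hd : d < 10) : digitVal (Nat.digitChar d) = (d : Int) := by
  interval_cases d <;> decide

-- A's loop re-expressed: folding (p + (f c - L)) over a list is the mapped sum minus L·length.
lemma foldl_sub_const (l : List Char) (f : Char → Int) (L acc : Int) :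
    l.foldl (fun p c => p + (f c - L)) acc = acc + (l.map f).sum - L * l.length := by
  induction l generalizing acc with
  | nil => simp
  | cons c t ih => simp [ih]; ring

-- B's loop on a nonnegative input computes the digit sum and digit count of Nat.toDigits.
lemma funcAltLoop_eq (n : ℕ) (hn : 0 < n) : ∀ t c : Int,
    funcAltLoop (n : Int) t c =
      (t + ((Nat.toDigits 10 n).map digitVal).sum, c + (Nat.toDigits 10 n).length) := by
  induction n using Nat.strong_induction_on with
  | _ n ih =>
    intro t c
    rw [funcAltLoop]
    have h10 : (0:Int) ≤ 10 := by norm_num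
    have hfd : PySem.Int.floordiv (n : Int) 10 = ((n / 10 : ℕ) : Int) := by
      simp [PySem.Int.floordiv, Int.fdiv_eq_ediv]
    have hfm : PySem.Int.mod (n : Int) 10 = ((n % 10 : ℕ) : Int) := by
      simp [PySem.Int.mod, Int.fmod_eq_emod]
    rw [dif_pos (by exact_mod_cast hn), hfd, hfm]
    by_cases hlt : n < 10
    · have hdiv : n / 10 = 0 := Nat.div_eq_of_lt hlt
      have hmod : n % 10 = n := Nat.mod_eq_of_lt hlt
      rw [hdiv, hmod, funcAltLoop]
      simp [Nat.toDigits_of_lt_base hlt, digitVal_digitChar n hlt]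
    · rw [Nat.not_lt] at hlt
      have hdivpos : 0 < n / 10 := Nat.div_pos hlt (by norm_num)
      have hsplit : Nat.toDigits 10 n =
          Nat.toDigits 10 (n / 10) ++ [Nat.digitChar (n % 10)] := by
        have := Nat.toDigits_append_toDigits (b := 10) (n := n / 10) (d := n % 10)
          (by norm_num) hdivpos (Nat.mod_lt n (by norm_num))
        rw [Nat.toDigits_of_lt_base (Nat.mod_lt n (by norm_num))] at this
        rw [← this.symm]
        congr 1
        omega
      rw [ih (n / 10) (Nat.div_lt_self hn (by norm_num)) hdivpos, hsplit]
      simp [digitVal_digitChar (n % 10) (Nat.mod_lt n (by norm_num))]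
      constructor
      · ring
      · ring

lemma toChars_nonneg (n : Int) (h : 0 ≤ n) :
    (PySem.Int.toStr n).toList = Nat.toDigits 10 n.toNat := by
  simp [PySem.Int.toStr, PySem.Int.toChars, Int.not_lt.mpr h]

-- ===== VERDICT (by name: the statement is the Claim_ definition above) =====
theorem func_spec : Claim_equal_func := by
  intro sequence _ hpre
  unfold Spec_func func func_alt
  dsimp only
  have hlen : PySem.Str.len (PySem.Int.toStr sequence)
      = ((PySem.Int.toStr sequence).toList.length : Int) := by
    simp [PySem.Str.len]
  rw [hlen, toChars_nonneg sequence hpre, foldl_sub_const]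
  rcases eq_or_lt_of_le hpre with h0 | hpos
  · -- sequence = 0 : A iterates over "0"; B's loop never runs, count defaults to 1
    rw [← h0]
    have hz : funcAltLoop 0 0 0 = (0, 0) := by rw [funcAltLoop]; simp
    rw [hz]
    decide
  · have hn : 0 < sequence.toNat := by omega
    have hcast : ((sequence.toNat : ℕ) : Int) = sequence := by omega
    rw [← hcast, funcAltLoop_eq sequence.toNat hn 0 0]
    have hlpos : 0 < (Nat.toDigits 10 sequence.toNat).length :=
      Nat.length_toDigits_pos
    simp only [zero_add]
    have hne : ((Nat.toDigits 10 sequence.toNat).length : Int) ≠ 0 := by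
      omega
    rw [if_neg hne]
    simp only [Int.toNat_natCast]
    show (List.map digitVal _).sum - _ = _
    ring
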